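-- pv_equiv track=rewrite | github.com/FabBodson/Bac1 | Programmation_de_Base/LabosPRB/labo6/listes_1d_utils.py | concatener_en_entier
-- ===== SOURCE A (Python) =====
-- def concatener_en_entier(liste):
--     """
--     Cette fonction transforme une liste de nombre entiers en un seul nombre entier, en concaténant tous les chiffres les
--     un aux autres. Cette fonction considère les nombres comme non-signés.
--     Exemples:
--     - [1, 2, 3] -> 123
--     - [1, 2, -4] -> 124
--     :param liste: list. Il s'agit d'une liste de nombres entiers. Ce paramètre doit toujours être défini et ne peut être "None".
--     :return: int, nombre entier représentant la concaténation de tous les chiffres de la liste originale.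
--     """
--     if len(liste) < 1:
--         return False
--
--     else:
--         nbr = ''
--         for element in liste:
--             if element < 0:
--                 element = abs(element)
--                 nbr += str(element)
--             else:
--                 nbr += str(element)
--
--         nbr = int(nbr)
--
--         return nbr
-- ===== SOURCE B (Python) =====
-- def concatener_en_entier(liste):
--     """Arithmetic re-implementation: instead of building a string of digits and
--     parsing it back with int(), accumulate the result as an integer, shifting the
--     accumulator left by the decimal width of each (unsigned) element."""
--     if len(liste) < 1:
--         return False
--
--     result = 0
--     for element in liste:
--         d = -element if element < 0 else element
--         shift = 10
--         while shift <= d: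
--             shift *= 10
--         result = result * shift + d
--     return result
-- ===== Notes on version B (the rewrite author's own statement) =====
-- stated objective: alternative
-- what changed: B replaces A's text pipeline (build a string of the unsigned elements' digits, then parse it with int()) by pure integer arithmetic: a single accumulator that is shifted left by each element's decimal width (computed with a multiplicative loop) and incremented, so no string is ever built or parsed.
-- outside the precondition, e.g. on concatener_en_entier([]): A returns False, B returns False
import Mathlib
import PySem

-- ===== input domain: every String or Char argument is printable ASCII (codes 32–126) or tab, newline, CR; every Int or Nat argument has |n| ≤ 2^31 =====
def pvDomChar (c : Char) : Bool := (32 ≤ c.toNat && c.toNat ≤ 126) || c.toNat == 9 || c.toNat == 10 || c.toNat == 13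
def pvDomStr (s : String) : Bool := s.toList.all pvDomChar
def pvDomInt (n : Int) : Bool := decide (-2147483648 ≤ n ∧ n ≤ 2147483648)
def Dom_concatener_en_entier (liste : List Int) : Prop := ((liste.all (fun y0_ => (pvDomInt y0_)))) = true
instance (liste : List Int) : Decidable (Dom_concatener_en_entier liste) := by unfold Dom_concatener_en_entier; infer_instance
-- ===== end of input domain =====

-- B replaces A's text pipeline (build the digit string, parse it with int()) by integer
-- arithmetic: shift an accumulator left by each element's decimal width and add.  Objective:
-- alternative (no string is ever built or parsed).

-- ===== PORT A =====
-- Python's int(s) is PySem.Int.ofStr?, but its digit loop is a module-private definition of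
-- PySemCore which no lemma exports and which proofs cannot unfold; so int(nbr) is ported by
-- hand, step for step, with the SAME algorithm as PySem.Int.ofChars? (strip int-whitespace on
-- both ends, optional sign, digits with single '_' separators, none = ValueError) — exact on
-- every string, in particular on the nonempty digit strings A builds.
def pvIntDigits? : List Char → Bool → Nat → Option Nat
  | [], afterDigit, acc => if afterDigit = true then some acc else none
  | c :: rest, afterDigit, acc =>
    if c.isDigit = true then pvIntDigits? rest true (acc * 10 + (c.toNat - '0'.toNat))
    else
      if c = '_' ∧ afterDigit = true then
        match rest with
        | d :: _ => if d.isDigit = true then pvIntDigits? rest false acc else none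
        | [] => none
      else none

def pvIntChars? (s : List Char) : Option Int :=
  match ((s.dropWhile PySem.Int.isIntSpace).reverse.dropWhile PySem.Int.isIntSpace).reverse with
  | '-' :: ds => (pvIntDigits? ds false 0).map (fun n => -(n : Int))
  | '+' :: ds => (pvIntDigits? ds false 0).map (fun n => (n : Int))
  | ds => (pvIntDigits? ds false 0).map (fun n => (n : Int))

-- The Python string nbr is kept as its list of characters (str(n) = PySem.Int.toChars n);
-- on the empty list Python returns False, which is not an Int: that input is excluded by Pre_
-- and the port returns 0 there.  int(nbr) cannot raise on the nonempty all-digit nbr, so the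
-- `.getD 0` default is never taken on admitted inputs (the proofs show pvIntChars? = some _).
def concatener_en_entier (liste : List Int) : Int :=
  if liste.length < 1 then 0
  else
    let nbr := liste.foldl
      (fun acc e => if e < 0 then acc ++ PySem.Int.toChars (-e) else acc ++ PySem.Int.toChars e) []
    (pvIntChars? nbr).getD 0

-- ===== PORT B =====
-- Source B's `shift = 10; while shift <= d: shift *= 10` (the guard 0 < p only makes the loop
-- total; it holds on every call the port makes, exactly as in Source B where shift starts at 10).
def pvShift (p d : Int) : Int :=
  if h : 0 < p ∧ p ≤ d then pvShift (p * 10) d else p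
termination_by (d + 1 - p).toNat
decreasing_by omega

def concatener_en_entier_alt (liste : List Int) : Int :=
  if liste.length < 1 then 0
  else liste.foldl
    (fun r e =>
      let d := if e < 0 then -e else e
      r * pvShift 10 d + d) 0

-- ===== PRECONDITION & SPEC =====
-- Pre_ excludes exactly the empty list, on which A returns False — a bool, not a value of the
-- declared int return type (B mirrors it; the ports return 0 there, outside the claim).
def Pre_concatener_en_entier (liste : List Int) : Prop := liste ≠ []
instance (liste : List Int) : Decidable (Pre_concatener_en_entier liste) := by
  unfold Pre_concatener_en_entier; infer_instance

def pvWitness_concatener_en_entier : List Int := [1, 2, -4]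

def Spec_concatener_en_entier (liste : List Int) (out : Int) : Prop := out = concatener_en_entier_alt liste
instance (liste : List Int) (out : Int) : Decidable (Spec_concatener_en_entier liste out) := by unfold Spec_concatener_en_entier; infer_instance

-- ===== CLAIM (what is proved, stated in full; the proofs are below) =====
def Claim_equal_concatener_en_entier : Prop := ∀ (liste : List Int), Dom_concatener_en_entier liste → Pre_concatener_en_entier liste → Spec_concatener_en_entier liste (concatener_en_entier liste)

-- ===== LEMMAS AND PROOFS =====

-- decimal digit-string value, read left to right
def pvStep (a : Nat) (c : Char) : Nat := a * 10 + (c.toNat - '0'.toNat)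

-- 10 ^ (number of decimal digits of m)
def pvNP (m : Nat) : Nat :=
  if m < 10 then 10 else 10 * pvNP (m / 10)
termination_by m
decreasing_by omega

-- --- Nat.toDigits 10 recurrence ---

theorem pv_core_eq (n : Nat) : ∀ (f : Nat) (l : List Char), n < f →
    Nat.toDigitsCore 10 f n l = Nat.toDigits 10 n ++ l := by
  induction n using Nat.strong_induction_on with
  | _ n ih =>
    intro f l hf
    match f, hf with
    | f + 1, hf =>
      by_cases h0 : n / 10 = 0
      · simp [Nat.toDigitsCore, Nat.toDigits, h0]
      · have h10 : 10 ≤ n := by omega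
        have hlt : n / 10 < n := by omega
        rw [show Nat.toDigitsCore 10 (f + 1) n l
              = Nat.toDigitsCore 10 f (n / 10) ((n % 10).digitChar :: l) by
            simp [Nat.toDigitsCore, h0],
          show Nat.toDigits 10 n
              = Nat.toDigitsCore 10 n (n / 10) [(n % 10).digitChar] by
            simp [Nat.toDigits, Nat.toDigitsCore, h0],
          ih _ hlt f _ (by omega), ih _ hlt n _ (by omega)]
        simp

theorem pv_D_small {m : Nat} (h : m < 10) :
    Nat.toDigits 10 m = [Nat.digitChar m] := by
  have h0 : m / 10 = 0 := by omega
  have hm : m % 10 = m := by omega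
  simp [Nat.toDigits, Nat.toDigitsCore, h0, hm]

theorem pv_D_big {m : Nat} (h : 10 ≤ m) :
    Nat.toDigits 10 m = Nat.toDigits 10 (m / 10) ++ [Nat.digitChar (m % 10)] := by
  have h0 : ¬ m / 10 = 0 := by omega
  rw [show Nat.toDigits 10 m = Nat.toDigitsCore 10 m (m / 10) [(m % 10).digitChar] by
      simp [Nat.toDigits, Nat.toDigitsCore, h0]]
  exact pv_core_eq _ _ _ (by omega)

theorem pv_digitChar_toNat {d : Nat} (h : d < 10) :
    (Nat.digitChar d).toNat = '0'.toNat + d := by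
  interval_cases d <;> decide

theorem pv_digitChar_isDigit {d : Nat} (h : d < 10) :
    (Nat.digitChar d).isDigit = true := by
  interval_cases d <;> decide

theorem pv_D_digits (m : Nat) : ∀ c ∈ Nat.toDigits 10 m, c.isDigit = true := by
  induction m using Nat.strong_induction_on with
  | _ m ih =>
    by_cases h : m < 10
    · rw [pv_D_small h]
      simpa using pv_digitChar_isDigit h
    · rw [pv_D_big (by omega)]
      intro c hc
      rcases List.mem_append.1 hc with hc | hc
      · exact ih (m / 10) (by omega) c hc
      · simp at hc
        subst hc
        exact pv_digitChar_isDigit (by omega)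

theorem pv_D_ne_nil (m : Nat) : Nat.toDigits 10 m ≠ [] := by
  by_cases h : m < 10
  · rw [pv_D_small h]; simp
  · rw [pv_D_big (by omega)]; simp

-- value of the digits of m, appended after accumulator a
theorem pv_D_val (m : Nat) : ∀ a : Nat,
    List.foldl pvStep a (Nat.toDigits 10 m) = a * pvNP m + m := by
  induction m using Nat.strong_induction_on with
  | _ m ih =>
    intro a
    by_cases h : m < 10
    · rw [pv_D_small h, pvNP]
      simp [pvStep, pv_digitChar_toNat h, if_pos h]
    · rw [pv_D_big (by omega), List.foldl_append, ih (m / 10) (by omega) a]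
      have hNP : pvNP m = 10 * pvNP (m / 10) := by
        rw [pvNP]; rw [if_neg h]
      rw [hNP]
      simp only [List.foldl_cons, List.foldl_nil, pvStep,
        pv_digitChar_toNat (Nat.mod_lt m (by omega))]
      have := Nat.div_add_mod m 10
      ring_nf
      omega

-- --- pvShift = pvNP ---

theorem pv_shift_aux (k : Nat) : ∀ (p : Int) (m : Nat), 0 < p → (m : Int) < p * 10 ^ k →
    pvShift (10 * p) (m : Int) = 10 * pvShift p ((m / 10 : Nat) : Int) := by
  induction k with
  | zero =>
    intro p m hp hm
    simp only [pow_zero, mul_one] at hm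
    have h1 : ¬ (0 < 10 * p ∧ 10 * p ≤ (m : Int)) := by omega
    have h2 : ¬ (0 < p ∧ p ≤ ((m / 10 : Nat) : Int)) := by
      have : ((m / 10 : Nat) : Int) ≤ (m : Int) := by
        exact_mod_cast Nat.div_le_self m 10
      omega
    rw [pvShift]; rw [dif_neg h1]
    rw [pvShift]; rw [dif_neg h2]
  | succ k ihk =>
    intro p m hp hm
    by_cases hc : p ≤ ((m / 10 : Nat) : Int)
    · have hdm : (10 : Int) * ((m / 10 : Nat) : Int) ≤ (m : Int) := by
        have := Nat.div_add_mod m 10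
        have h2 : m % 10 < 10 := Nat.mod_lt m (by omega)
        push_cast
        omega
      have hle : 10 * p ≤ (m : Int) := by nlinarith
      rw [pvShift]; rw [dif_pos (⟨by omega, hle⟩ : 0 < 10 * p ∧ 10 * p ≤ (m : Int))]
      rw [show (10 : Int) * p * 10 = 10 * (10 * p) by ring]
      rw [ihk (10 * p) m (by omega)
        (by rw [show ((10 * p) * 10 ^ k : Int) = p * 10 ^ (k + 1) by ring]; exact hm)]
      rw [show pvShift p ((m / 10 : Nat) : Int)
            = pvShift (10 * p) ((m / 10 : Nat) : Int) by
          rw [pvShift]; rw [dif_pos ⟨hp, hc⟩]; rw [mul_comm]]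
    · have hmlt : (m : Int) < 10 * p := by
        have := Nat.div_add_mod m 10
        have h2 : m % 10 < 10 := Nat.mod_lt m (by omega)
        push_cast at hc ⊢
        omega
      rw [pvShift]; rw [dif_neg (show ¬ (0 < 10 * p ∧ 10 * p ≤ (m : Int)) by omega)]
      rw [pvShift]; rw [dif_neg (show ¬ (0 < p ∧ p ≤ ((m / 10 : Nat) : Int)) by omega)]

theorem pv_shift_eq (m : Nat) : pvShift 10 (m : Int) = (pvNP m : Int) := by
  induction m using Nat.strong_induction_on with
  | _ m ih =>
    by_cases h : m < 10
    · rw [pvShift]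
      rw [dif_neg (show ¬ ((0:Int) < 10 ∧ 10 ≤ (m : Int)) by exact_mod_cast (by omega : ¬ ((0:Int) < 10 ∧ 10 ≤ (m : Int))))]
      rw [pvNP]; rw [if_pos h]
      norm_num
    · have h10 : (10 : Int) ≤ (m : Int) := by exact_mod_cast Nat.le_of_not_lt h
      rw [pvShift]; rw [dif_pos (⟨by norm_num, h10⟩ : (0:Int) < 10 ∧ 10 ≤ (m : Int))]
      rw [show ((10 : Int) * 10 : Int) = 10 * 10 by ring]
      rw [pv_shift_aux m 10 m (by norm_num)
        (by
          have h1 : (m : Int) < 10 ^ m := by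
            exact_mod_cast Nat.lt_pow_self (by norm_num) (n := m)
          nlinarith [pow_pos (show (0:Int) < 10 by norm_num) m]),
        ih (m / 10) (by omega)]
      have hNP : pvNP m = 10 * pvNP (m / 10) := by
        rw [pvNP]; rw [if_neg h]
      rw [hNP]
      push_cast
      ring

-- --- the hand-ported int() on nonempty all-digit strings ---

theorem pv_digits_run (cs : List Char) : ∀ (b : Bool) (a : Nat),
    (∀ c ∈ cs, c.isDigit = true) → (cs ≠ [] ∨ b = true) →
    pvIntDigits? cs b a = some (List.foldl pvStep a cs) := by
  induction cs with
  | nil =>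
    intro b a _ hb
    rcases hb with h | h
    · exact absurd rfl h
    · subst h
      rfl
  | cons c t iht =>
    intro b a hd _
    simp only [pvIntDigits?]
    rw [if_pos (hd c (by simp))]
    exact iht true _ (fun x hx => hd x (by simp [hx])) (Or.inr rfl)

theorem pv_digit_not_space {c : Char} (h : c.isDigit = true) :
    PySem.Int.isIntSpace c = false := by
  have h0 : '0' ≤ c ∧ c ≤ '9' := by simpa [Char.isDigit, Char.le_def] using h
  simp only [PySem.Int.isIntSpace, Bool.or_eq_false_iff, decide_eq_false_iff_not]
  rcases h0 with ⟨h1, h2⟩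
  simp only [Char.le_def] at h1 h2
  refine ⟨⟨⟨⟨⟨?_, ?_⟩, ?_⟩, ?_⟩, ?_⟩, ?_⟩ <;> (rintro rfl; simp_all)

theorem pv_parse_digits (cs : List Char) (hne : cs ≠ [])
    (hd : ∀ c ∈ cs, c.isDigit = true) :
    pvIntChars? cs = some ((List.foldl pvStep 0 cs : Nat) : Int) := by
  have hds : cs.dropWhile PySem.Int.isIntSpace = cs := by
    cases cs with
    | nil => simp
    | cons c t =>
      rw [List.dropWhile_cons, pv_digit_not_space (hd c (by simp))]
      simp
  have hds2 : cs.reverse.dropWhile PySem.Int.isIntSpace = cs.reverse := by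
    cases hr : cs.reverse with
    | nil => simp
    | cons c t =>
      have hc : c ∈ cs := by
        have : c ∈ cs.reverse := by rw [hr]; simp
        simpa using this
      rw [List.dropWhile_cons, pv_digit_not_space (hd c hc)]
      simp
  rw [pvIntChars?]
  rw [hds, hds2, List.reverse_reverse]
  have hrun := pv_digits_run cs false 0 hd (Or.inl hne)
  split
  · exfalso
    have := hd '-' (by simp)
    simp at this
  · exfalso
    have := hd '+' (by simp)
    simp at this
  · rw [hrun]
    simp

-- --- the two folds agree ---

theorem pv_main (l : List Int) : ∀ (acc : List Char), acc ≠ [] →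
    (∀ c ∈ acc, c.isDigit = true) →
    (pvIntChars? (l.foldl
        (fun acc e => if e < 0 then acc ++ PySem.Int.toChars (-e) else acc ++ PySem.Int.toChars e)
        acc)).getD 0
      = l.foldl
        (fun r e =>
          let d := if e < 0 then -e else e
          r * pvShift 10 d + d) ((List.foldl pvStep 0 acc : Nat) : Int) := by
  induction l with
  | nil =>
    intro acc hne hd
    simp [pv_parse_digits acc hne hd]
  | cons e t iht =>
    intro acc hne hd
    set d : Int := if e < 0 then -e else e with hd_def
    have hd_nonneg : 0 ≤ d := by rw [hd_def]; split <;> omega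
    have htc : (if e < 0 then acc ++ PySem.Int.toChars (-e) else acc ++ PySem.Int.toChars e)
        = acc ++ Nat.toDigits 10 d.toNat := by
      rw [hd_def]
      split <;> rename_i hsgn <;>
        (rw [PySem.Int.toChars]; rw [if_neg (by omega)])
    rw [List.foldl_cons, List.foldl_cons, htc]
    rw [iht (acc ++ Nat.toDigits 10 d.toNat)
        (by simp [pv_D_ne_nil d.toNat])
        (by
          intro c hc
          rcases List.mem_append.1 hc with hc | hc
          · exact hd c hc
          · exact pv_D_digits d.toNat c hc)]
    congr 1
    rw [List.foldl_append, pv_D_val d.toNat]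
    push_cast
    rw [← hd_def]
    rw [← pv_shift_eq d.toNat]
    rw [Int.toNat_of_nonneg hd_nonneg]

-- ===== VERDICT (by name: the statement is the Claim_ definition above) =====
theorem concatener_en_entier_spec : Claim_equal_concatener_en_entier := by
  intro liste _hdom hpre
  unfold Spec_concatener_en_entier concatener_en_entier concatener_en_entier_alt
  match liste, hpre with
  | x :: t, _ =>
    simp only [List.length_cons]
    rw [if_neg (by omega), if_neg (by omega)]
    set d0 : Int := if x < 0 then -x else x with hd0
    have hd0n : 0 ≤ d0 := by rw [hd0]; split <;> omega
    have htc0 : (if x < 0 then ([] : List Char) ++ PySem.Int.toChars (-x) else [] ++ PySem.Int.toChars x)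
        = Nat.toDigits 10 d0.toNat := by
      rw [hd0]
      split <;> rename_i hsgn <;> (rw [PySem.Int.toChars]; rw [if_neg (by omega)]; simp)
    rw [List.foldl_cons, List.foldl_cons, htc0]
    rw [pv_main t (Nat.toDigits 10 d0.toNat) (pv_D_ne_nil _) (pv_D_digits _)]
    rw [pv_D_val d0.toNat 0]
    simp only [Nat.zero_mul, Nat.zero_add]
    rw [Int.toNat_of_nonneg hd0n]
    rw [show (0 : Int) * pvShift 10 d0 + d0 = d0 by ring]
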